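-- pv_equiv track=rewrite | github.com/sebastianaltomare/advent-of-code | y2024/day09/part_two.py | find_first_open_space
-- ===== SOURCE A (Python) =====
-- FREE = "."
--
-- def find_first_open_space(blocks, index, length):
--     """
--     Determines the first open space possible to move a file block.
--
--     Args:
--         blocks (List[int | str]): A list of file blocks.
--         index (int): The index of the given file block in the file system.
--         length (int): The length of the given file block.
--
--     Returns:
--         int | None: The index of the free space if exists, else None.
--     """
--     current_length = 0
--     start = None
--     for i in range(index):
--         if blocks[i] == FREE:
--             if start is None:
--                 start = i
--             current_length += 1
--             if current_length >= length:
--                 return start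
--         else:
--             current_length = 0
--             start = None
--     return None
-- ===== SOURCE B (Python) =====
-- FREE = "."
--
-- def find_first_open_space(blocks, index, length):
--     # Pass 1: collect maximal free runs in blocks[:index] as (start, run_length).
--     runs = []
--     start = None
--     for i in range(index):
--         if blocks[i] == FREE:
--             if start is None:
--                 start = i
--         else:
--             if start is not None:
--                 runs.append((start, i - start))
--                 start = None
--     if start is not None:
--         runs.append((start, index - start))
--     # Pass 2: first run long enough.
--     for s, r in runs:
--         if r >= length:
--             return s
--     return None
-- ===== Notes on version B (the rewrite author's own statement) =====
-- stated objective: alternative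
-- what changed: Replaced A's fused single scan (running free-run counter with early return) by a two-pass algorithm: first collect all maximal free runs of blocks[:index] as (start, run_length) pairs, then return the start of the first run with run_length >= length. Pre_ excludes index > len(blocks), where A raises IndexError unless its early return fires before the end of the list, a corner that is an artefact of the fused early return; B always scans blocks[:index] fully and raises IndexError there.
-- outside the precondition, e.g. on find_first_open_space(['.', 'x'], 5, 1): A returns 0, B raises IndexError
import Mathlib
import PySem

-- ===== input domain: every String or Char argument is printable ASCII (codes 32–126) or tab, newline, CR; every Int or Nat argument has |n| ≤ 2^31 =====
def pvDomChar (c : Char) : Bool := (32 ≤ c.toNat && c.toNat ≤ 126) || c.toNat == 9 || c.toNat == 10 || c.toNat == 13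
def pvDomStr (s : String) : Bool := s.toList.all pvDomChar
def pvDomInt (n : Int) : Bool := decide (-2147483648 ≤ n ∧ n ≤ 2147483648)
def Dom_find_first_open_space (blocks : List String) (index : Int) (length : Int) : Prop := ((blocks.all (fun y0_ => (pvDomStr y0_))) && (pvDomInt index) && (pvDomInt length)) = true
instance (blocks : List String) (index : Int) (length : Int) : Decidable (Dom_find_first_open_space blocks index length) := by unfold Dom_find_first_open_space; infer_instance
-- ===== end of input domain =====

-- B replaces A's fused scan (current run counter with early return) by two passes: first
-- collect the maximal free runs of blocks[:index] as (start, run_length) pairs, then return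
-- the start of the first run with run_length ≥ length; objective: alternative decomposition.

-- ===== PORT A =====
-- A's loop over range(index) with state (current_length, start) and early return.
def ffosA_go (blocks : List String) (length : Int) : List Int → Int → Option Int → Option Int
  | [], _, _ => none
  | i :: rest, cur, start =>
    match PySem.List.pyGet? blocks i with
    | some b =>
      if b = "." then
        let start' := match start with | none => some i | some s => some s
        let cur' := cur + 1
        if cur' ≥ length then start' else ffosA_go blocks length rest cur' start'
      else ffosA_go blocks length rest 0 none
    | none => none  -- Python raises IndexError here; excluded by Pre_

def find_first_open_space (blocks : List String) (index : Int) (length : Int) : Option Int :=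
  ffosA_go blocks length (PySem.List.pyRange 0 index 1) 0 none

-- ===== PORT B =====
-- B pass 1: collect maximal free runs of blocks[:index] as (start, run_length) pairs.
def ffosB_runs (blocks : List String) (index : Int) : List Int → Option Int → List (Int × Int) → List (Int × Int)
  | [], start, acc =>
    match start with
    | some s => acc ++ [(s, index - s)]
    | none => acc
  | i :: rest, start, acc =>
    match PySem.List.pyGet? blocks i with
    | some b =>
      if b = "." then
        ffosB_runs blocks index rest (match start with | none => some i | some s => some s) acc
      else
        match start with
        | some s => ffosB_runs blocks index rest none (acc ++ [(s, i - s)])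
        | none => ffosB_runs blocks index rest none acc
    | none => acc  -- Python raises IndexError here; excluded by Pre_

-- B pass 2: first run long enough.
def ffosB_pick (length : Int) : List (Int × Int) → Option Int
  | [] => none
  | (s, r) :: rest => if r ≥ length then some s else ffosB_pick length rest

def find_first_open_space_alt (blocks : List String) (index : Int) (length : Int) : Option Int :=
  ffosB_pick length (ffosB_runs blocks index (PySem.List.pyRange 0 index 1) none [])

-- ===== PRECONDITION & SPEC =====
-- Pre_ excludes index > len(blocks): there A raises IndexError unless its early return fires
-- before the end of the list (an artefact of the fused early return), while B always scans
-- blocks[:index] fully and raises IndexError.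
def Pre_find_first_open_space (blocks : List String) (index : Int) (length : Int) : Prop :=
  index ≤ (blocks.length : Int)
instance (blocks : List String) (index : Int) (length : Int) : Decidable (Pre_find_first_open_space blocks index length) := by unfold Pre_find_first_open_space; infer_instance

def pvWitness_find_first_open_space : List String × Int × Int := (["x", ".", "."], 3, 2)

def Spec_find_first_open_space (blocks : List String) (index : Int) (length : Int) (out : Option Int) : Prop := out = find_first_open_space_alt blocks index length
instance (blocks : List String) (index : Int) (length : Int) (out : Option Int) : Decidable (Spec_find_first_open_space blocks index length out) := by unfold Spec_find_first_open_space; infer_instance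

-- ===== CLAIM (what is proved, stated in full; the proofs are below) =====
def Claim_equal_find_first_open_space : Prop := ∀ (blocks : List String) (index : Int) (length : Int), Dom_find_first_open_space blocks index length → Pre_find_first_open_space blocks index length → Spec_find_first_open_space blocks index length (find_first_open_space blocks index length)

-- ===== LEMMAS AND PROOFS =====

-- pick skips a prefix of short runs.
theorem pick_append (length : Int) (acc l : List (Int × Int))
    (hacc : ∀ p ∈ acc, p.2 < length) :
    ffosB_pick length (acc ++ l) = ffosB_pick length l := by
  induction acc with
  | nil => rfl
  | cons p rest ih =>
    obtain ⟨s, r⟩ := p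
    have hr : r < length := hacc (s, r) (by simp)
    simp only [List.cons_append, ffosB_pick, if_neg (by omega : ¬ r ≥ length)]
    exact ih (fun q hq => hacc q (by simp [hq]))

-- the runs accumulator only ever grows on the right.
theorem runs_acc (blocks : List String) (index : Int) (is : List Int)
    (start : Option Int) (acc : List (Int × Int)) :
    ffosB_runs blocks index is start acc = acc ++ ffosB_runs blocks index is start [] := by
  induction is generalizing start acc with
  | nil => cases start <;> simp [ffosB_runs]
  | cons i rest ih =>
    simp only [ffosB_runs]
    cases h : PySem.List.pyGet? blocks i with
    | none => simp
    | some b =>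
      by_cases hb : b = "."
      · simp only [if_pos hb]; exact ih _ _
      · simp only [if_neg hb]
        cases start with
        | none => exact ih _ _
        | some s =>
          show ffosB_runs blocks index rest none (acc ++ [(s, i - s)]) =
            acc ++ ffosB_runs blocks index rest none ([] ++ [(s, i - s)])
          rw [List.nil_append, ih none (acc ++ [(s, i - s)]), ih none [(s, i - s)],
            List.append_assoc]

-- once the current run is already long enough, B's answer is its start.
theorem emit (blocks : List String) (length : Int) (index : Int) :
    ∀ (n : Nat) (j s : Int) (acc : List (Int × Int)),
    (index - j).toNat = n →
    (∀ i : Int, 0 ≤ i → i < index → PySem.List.pyGet? blocks i ≠ none) →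
    0 ≤ j → j ≤ index → length ≤ j - s →
    (∀ p ∈ acc, p.2 < length) →
    ffosB_pick length (ffosB_runs blocks index (PySem.List.pyRange j index 1) (some s) acc) = some s := by
  intro n
  induction n with
  | zero =>
    intro j s acc hn hv hj0 hji hlen hacc
    have hji' : index ≤ j := by omega
    rw [PySem.List.pyRange_one_eq_nil hji']
    simp only [ffosB_runs]
    rw [pick_append length acc _ hacc]
    simp only [ffosB_pick]
    rw [if_pos (by omega : index - s ≥ length)]
  | succ n ih =>
    intro j s acc hn hv hj0 hji hlen hacc
    have hjlt : j < index := by omega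
    rw [PySem.List.pyRange_one_cons hjlt]
    simp only [ffosB_runs]
    cases h : PySem.List.pyGet? blocks j with
    | none => exact absurd h (hv j hj0 hjlt)
    | some b =>
      by_cases hb : b = "."
      · simp only [if_pos hb]
        exact ih (j + 1) s acc (by omega) hv (by omega) (by omega) (by omega) hacc
      · simp only [if_neg hb]
        show ffosB_pick length (ffosB_runs blocks index (PySem.List.pyRange (j + 1) index 1)
          none (acc ++ [(s, j - s)])) = some s
        rw [runs_acc, List.append_assoc,
          pick_append length acc _ hacc, List.singleton_append]
        simp only [ffosB_pick]
        rw [if_pos (by omega : j - s ≥ length)]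

-- main loop invariant: A's fused scan agrees with B's runs table.
theorem main_inv (blocks : List String) (length : Int) (index : Int) :
    ∀ (n : Nat) (j cur : Int) (start : Option Int) (acc : List (Int × Int)),
    (index - j).toNat = n →
    (∀ i : Int, 0 ≤ i → i < index → PySem.List.pyGet? blocks i ≠ none) →
    0 ≤ j →
    (∀ p ∈ acc, p.2 < length) →
    (∀ s, start = some s → cur = j - s ∧ cur < length) →
    (start = none → cur = 0) →
    ffosA_go blocks length (PySem.List.pyRange j index 1) cur start =
      ffosB_pick length (ffosB_runs blocks index (PySem.List.pyRange j index 1) start acc) := by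
  intro n
  induction n with
  | zero =>
    intro j cur start acc hn hv hj0 hacc hsome hnone
    have hji : index ≤ j := by omega
    rw [PySem.List.pyRange_one_eq_nil hji]
    simp only [ffosA_go]
    cases start with
    | none =>
      show none = ffosB_pick length acc
      rw [← List.append_nil acc, pick_append length acc [] hacc]
      rfl
    | some s =>
      obtain ⟨hc, hcl⟩ := hsome s rfl
      show none = ffosB_pick length (acc ++ [(s, index - s)])
      rw [pick_append length acc _ hacc]
      simp only [ffosB_pick]
      rw [if_neg (by omega : ¬ index - s ≥ length)]
  | succ n ih =>
    intro j cur start acc hn hv hj0 hacc hsome hnone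
    have hjlt : j < index := by omega
    rw [PySem.List.pyRange_one_cons hjlt]
    simp only [ffosA_go, ffosB_runs]
    cases h : PySem.List.pyGet? blocks j with
    | none => exact absurd h (hv j hj0 hjlt)
    | some b =>
      by_cases hb : b = "."
      · simp only [if_pos hb]
        cases start with
        | none =>
          have hc : cur = 0 := hnone rfl
          show (if cur + 1 ≥ length then (some j : Option Int)
              else ffosA_go blocks length (PySem.List.pyRange (j + 1) index 1) (cur + 1) (some j)) =
            ffosB_pick length (ffosB_runs blocks index (PySem.List.pyRange (j + 1) index 1) (some j) acc)
          by_cases hge : cur + 1 ≥ length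
          · rw [if_pos hge,
              emit blocks length index (index - (j + 1)).toNat (j + 1) j acc rfl hv
                (by omega) (by omega) (by omega) hacc]
          · rw [if_neg hge]
            exact ih (j + 1) (cur + 1) (some j) acc (by omega) hv (by omega) hacc
              (by intro s hs; cases hs; constructor <;> omega) (by intro hx; cases hx)
        | some s =>
          obtain ⟨hc, hcl⟩ := hsome s rfl
          show (if cur + 1 ≥ length then (some s : Option Int)
              else ffosA_go blocks length (PySem.List.pyRange (j + 1) index 1) (cur + 1) (some s)) =
            ffosB_pick length (ffosB_runs blocks index (PySem.List.pyRange (j + 1) index 1) (some s) acc)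
          by_cases hge : cur + 1 ≥ length
          · rw [if_pos hge,
              emit blocks length index (index - (j + 1)).toNat (j + 1) s acc rfl hv
                (by omega) (by omega) (by omega) hacc]
          · rw [if_neg hge]
            exact ih (j + 1) (cur + 1) (some s) acc (by omega) hv (by omega) hacc
              (by intro s' hs'; cases hs'; constructor <;> omega) (by intro hx; cases hx)
      · simp only [if_neg hb]
        cases start with
        | none =>
          exact ih (j + 1) 0 none acc (by omega) hv (by omega) hacc
            (by intro s hs; cases hs) (fun _ => rfl)
        | some s =>
          obtain ⟨hc, hcl⟩ := hsome s rfl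
          exact ih (j + 1) 0 none (acc ++ [(s, j - s)]) (by omega) hv (by omega)
            (by intro p hp; rcases List.mem_append.mp hp with h1 | h1
                · exact hacc p h1
                · simp at h1; subst h1; simpa using (by omega : j - s < length))
            (by intro s hs; cases hs) (fun _ => rfl)

-- ===== VERDICT (by name: the statement is the Claim_ definition above) =====
theorem find_first_open_space_spec : Claim_equal_find_first_open_space := by
  intro blocks index length _ hpre
  unfold Pre_find_first_open_space at hpre
  unfold Spec_find_first_open_space find_first_open_space find_first_open_space_alt
  refine (main_inv blocks length index (index - 0).toNat 0 0 none [] rfl ?_ le_rfl ?_ ?_ ?_).symm ▸ rfl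
  · intro i hi0 hii
    rw [Ne, PySem.List.pyGet?_eq_none_iff]
    intro hcontra
    exact hcontra ⟨by omega, by omega⟩
  · intro p hp; cases hp
  · intro s hs; cases hs
  · intro _; rfl
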